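-- pv_equiv track=rewrite | github.com/UnitedCTF/UnitedCTF-2019 | challenges/programming/blackjack/solution/solve.py | running_count
-- ===== SOURCE A (Python) =====
-- def running_count(seen_cards):
--     count = 0
--     for c in seen_cards:
--         if c["rank"] in ["2", "3", "4", "5", "6"]:
--             count += 1
--         if c["rank"] in ["10", "J", "Q", "K", "A"]:
--             count -= 1
--     return count
-- ===== SOURCE B (Python) =====
-- def running_count(seen_cards):
--     freq = {}
--     for c in seen_cards:
--         r = c["rank"]
--         freq[r] = freq.get(r, 0) + 1
--     return (sum(freq.get(r, 0) for r in ("2", "3", "4", "5", "6"))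
--             - sum(freq.get(r, 0) for r in ("10", "J", "Q", "K", "A")))
-- ===== Notes on version B (the rewrite author's own statement) =====
-- stated objective: alternative
-- what changed: B builds a rank-frequency table in one pass and then derives the count by summing over the two fixed rank categories, instead of A's per-card conditional increments.
import Mathlib
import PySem

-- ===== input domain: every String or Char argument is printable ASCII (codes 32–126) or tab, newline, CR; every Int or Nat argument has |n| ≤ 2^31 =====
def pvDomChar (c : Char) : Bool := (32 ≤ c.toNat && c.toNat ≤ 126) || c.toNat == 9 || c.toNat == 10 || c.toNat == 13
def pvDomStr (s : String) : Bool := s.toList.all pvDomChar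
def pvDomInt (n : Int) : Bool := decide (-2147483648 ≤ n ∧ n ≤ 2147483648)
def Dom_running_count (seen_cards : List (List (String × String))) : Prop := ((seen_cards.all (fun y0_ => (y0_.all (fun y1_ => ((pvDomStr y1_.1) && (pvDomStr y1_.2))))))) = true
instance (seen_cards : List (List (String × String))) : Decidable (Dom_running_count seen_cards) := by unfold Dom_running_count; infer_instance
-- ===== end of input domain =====

-- B replaces A's per-card conditional increments with a one-pass rank-frequency table summed over the two fixed rank categories (alternative decomposition, same cost).


-- ===== PORT A =====
def running_count (seen_cards : List (List (String × String))) : Int :=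
  seen_cards.foldl (fun count c =>
    let r := (PySem.Dict.mk c).getD "rank" ""
    let count := if r ∈ ["2", "3", "4", "5", "6"] then count + 1 else count
    if r ∈ ["10", "J", "Q", "K", "A"] then count - 1 else count) 0

-- ===== PORT B =====
def running_count_alt (seen_cards : List (List (String × String))) : Int :=
  let freq := seen_cards.foldl (fun d c =>
    let r := (PySem.Dict.mk c).getD "rank" ""
    d.insert r (d.getD r 0 + 1)) (PySem.Dict.empty : PySem.Dict String Int)
  (["2", "3", "4", "5", "6"].foldl (fun s r => s + freq.getD r 0) 0)
  - (["10", "J", "Q", "K", "A"].foldl (fun s r => s + freq.getD r 0) 0)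

-- ===== PRECONDITION & SPEC =====
-- Pre_ excludes exactly the cards without a "rank" key, on which both Pythons raise KeyError.
def Pre_running_count (seen_cards : List (List (String × String))) : Prop :=
  (seen_cards.all (fun c => c.any (fun p => p.1 == "rank"))) = true
instance (seen_cards : List (List (String × String))) : Decidable (Pre_running_count seen_cards) := by
  unfold Pre_running_count; infer_instance
def pvWitness_running_count : (List (List (String × String))) :=
  [[("rank", "2"), ("suit", "H")], [("rank", "K"), ("suit", "S")]]
def Spec_running_count (seen_cards : List (List (String × String))) (out : Int) : Prop := out = running_count_alt seen_cards
instance (seen_cards : List (List (String × String))) (out : Int) : Decidable (Spec_running_count seen_cards out) := by unfold Spec_running_count; infer_instance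

-- ===== CLAIM (what is proved, stated in full; the proofs are below) =====
def Claim_equal_running_count : Prop := ∀ (seen_cards : List (List (String × String))), Dom_running_count seen_cards → Pre_running_count seen_cards → Spec_running_count seen_cards (running_count seen_cards)

-- ===== LEMMAS AND PROOFS =====

-- A's fold over ranks equals signed category counts.
theorem rc_foldA (rs : List String) (acc : Int) :
    rs.foldl (fun count r =>
      let count := if r ∈ ["2", "3", "4", "5", "6"] then count + 1 else count
      if r ∈ ["10", "J", "Q", "K", "A"] then count - 1 else count) acc
    = acc + ((rs.count "2" : Int) + rs.count "3" + rs.count "4" + rs.count "5" + rs.count "6")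
          - ((rs.count "10" : Int) + rs.count "J" + rs.count "Q" + rs.count "K" + rs.count "A") := by
  induction rs generalizing acc with
  | nil => simp
  | cons r rs ih =>
    simp only [List.foldl_cons, ih, List.count_cons]
    by_cases h2 : r = "2"; · subst h2; simp; ring
    by_cases h3 : r = "3"; · subst h3; simp; ring
    by_cases h4 : r = "4"; · subst h4; simp; ring
    by_cases h5 : r = "5"; · subst h5; simp; ring
    by_cases h6 : r = "6"; · subst h6; simp; ring
    by_cases hT : r = "10"; · subst hT; simp; ring
    by_cases hJ : r = "J"; · subst hJ; simp; ring
    by_cases hQ : r = "Q"; · subst hQ; simp; ring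
    by_cases hK : r = "K"; · subst hK; simp; ring
    by_cases hA : r = "A"; · subst hA; simp; ring
    simp [h2, h3, h4, h5, h6, hT, hJ, hQ, hK, hA, Ne.symm]

-- freq lookup after B's counting fold = prior value + occurrence count of that rank.
theorem rc_freq_getD (seen : List (List (String × String))) (d : PySem.Dict String Int) (v : String) :
    (seen.foldl (fun d c =>
      let r := (PySem.Dict.mk c).getD "rank" ""
      d.insert r (d.getD r 0 + 1)) d).getD v 0
    = d.getD v 0 + ((seen.map (fun c => (PySem.Dict.mk c).getD "rank" "")).count v) := by
  induction seen generalizing d with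
  | nil => simp
  | cons c cs ih =>
    simp only [List.foldl_cons, ih, List.map_cons, List.count_cons]
    by_cases h : v = (PySem.Dict.mk c).getD "rank" ""
    · subst h; simp; ring
    · simp [PySem.Dict.getD_insert, h]
      exact fun hh => h hh.symm

-- A's fold over cards equals the same fold over the extracted ranks.
theorem rc_foldA_map (seen : List (List (String × String))) (acc : Int) :
    seen.foldl (fun count c =>
      let r := (PySem.Dict.mk c).getD "rank" ""
      let count := if r ∈ ["2", "3", "4", "5", "6"] then count + 1 else count
      if r ∈ ["10", "J", "Q", "K", "A"] then count - 1 else count) acc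
    = (seen.map (fun c => (PySem.Dict.mk c).getD "rank" "")).foldl (fun count r =>
      let count := if r ∈ ["2", "3", "4", "5", "6"] then count + 1 else count
      if r ∈ ["10", "J", "Q", "K", "A"] then count - 1 else count) acc := by
  induction seen generalizing acc with
  | nil => rfl
  | cons c cs ih => simp only [List.foldl_cons, List.map_cons, ih]

-- ===== VERDICT =====
theorem running_count_spec : Claim_equal_running_count := by
  intro seen _ _
  unfold Spec_running_count running_count running_count_alt
  rw [rc_foldA_map, rc_foldA]
  simp [List.foldl_cons, rc_freq_getD]
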